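-- pv_equiv track=rewrite | github.com/kiteco/kiteco-public | kite-python/kite_common/kite/codeexamples/context.py | _resolve_in
-- ===== SOURCE A (Python) =====
-- def _resolve_in(name, scope):
--     if name in scope:
--         return scope[name]
--
--     parts = name.split(".")
--     for i in range(1, len(parts)):
--         im = '.'.join(parts[:-i])
--         if im in scope:
--             return scope[im] + name[len(im):]
--
--     return None
-- ===== SOURCE B (Python) =====
-- def _resolve_in(name, scope):
--     best = None
--     for key in scope:
--         if key == name or name.startswith(key + '.'):
--             if best is None or len(key) > len(best):
--                 best = key
--     if best is None:
--         return None
--     return scope[best] + name[len(best):]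
-- ===== Notes on version B (the rewrite author's own statement) =====
-- stated objective: alternative
-- what changed: Instead of splitting the name into parts and probing each '.'-joined prefix against the dict from longest to shortest, B makes a single pass over the scope's keys keeping the longest key that equals the name or is a dotted prefix of it (unique, since equal-length prefixes of one string coincide), then applies the same scope[key] + name[len(key):] formula.
import Mathlib
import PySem

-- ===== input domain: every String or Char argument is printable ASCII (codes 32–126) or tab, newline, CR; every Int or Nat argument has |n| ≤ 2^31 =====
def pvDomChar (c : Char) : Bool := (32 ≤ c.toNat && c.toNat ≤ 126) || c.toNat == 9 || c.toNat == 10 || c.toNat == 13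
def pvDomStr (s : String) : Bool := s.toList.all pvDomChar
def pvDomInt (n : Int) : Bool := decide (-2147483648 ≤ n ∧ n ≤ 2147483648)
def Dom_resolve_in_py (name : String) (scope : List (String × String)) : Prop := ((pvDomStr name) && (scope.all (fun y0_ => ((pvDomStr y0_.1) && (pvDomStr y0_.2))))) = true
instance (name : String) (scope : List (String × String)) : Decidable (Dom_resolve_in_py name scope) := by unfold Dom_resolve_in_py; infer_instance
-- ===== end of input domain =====

-- B replaces A's longest-to-shortest probing of '.'-joined prefixes by a single pass over the
-- scope's keys keeping the longest matching key (alternative decomposition, same observable result).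


-- ===== PORT A =====
def resolveLoopA (d : PySem.Dict String String) (name : String) (parts : List String) :
    List Int → Option String
  | [] => none
  | i :: rest =>
      let im := PySem.Str.join "." (PySem.List.slice parts none (some (-i)))
      if d.contains im then
        (d.get? im).map (fun v => v ++ PySem.Str.slice name (some (PySem.Str.len im)) none)
      else resolveLoopA d name parts rest

def resolve_in_py (name : String) (scope : List (String × String)) : Option String :=
  let d := PySem.Dict.ofList scope
  if d.contains name then d.get? name
  else
    let parts := (PySem.Str.split? name ".").getD []
    resolveLoopA d name parts (PySem.List.pyRange 1 (PySem.List.len parts) 1)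


-- ===== PORT B =====
def bestLoopB (name : String) : List String → Option String → Option String
  | [], best => best
  | key :: rest, best =>
      if key == name || PySem.Str.startswith name (key ++ ".") then
        match best with
        | none => bestLoopB name rest (some key)
        | some b =>
            if PySem.Str.len key > PySem.Str.len b then bestLoopB name rest (some key)
            else bestLoopB name rest (some b)
      else bestLoopB name rest best

def resolve_in_py_alt (name : String) (scope : List (String × String)) : Option String :=
  let d := PySem.Dict.ofList scope
  match bestLoopB name d.keys none with
  | none => none
  | some best =>
      (d.get? best).map (fun v => v ++ PySem.Str.slice name (some (PySem.Str.len best)) none)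


-- ===== PRECONDITION & SPEC =====
def Spec_resolve_in_py (name : String) (scope : List (String × String)) (out : Option String) : Prop := out = resolve_in_py_alt name scope
instance (name : String) (scope : List (String × String)) (out : Option String) : Decidable (Spec_resolve_in_py name scope out) := by unfold Spec_resolve_in_py; infer_instance

-- ===== CLAIM (what is proved, stated in full; the proofs are below) =====
def Claim_equal_resolve_in_py : Prop := ∀ (name : String) (scope : List (String × String)), Dom_resolve_in_py name scope → Spec_resolve_in_py name scope (resolve_in_py name scope)

-- ===== LEMMAS AND PROOFS =====

def psplit : List Char → List (List Char)
  | [] => [[]]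
  | c :: r => if c = '.' then [] :: psplit r else (psplit r).modifyHead (c :: ·)

theorem psplit_ne_nil (l : List Char) : psplit l ≠ [] := by
  induction l with
  | nil => simp [psplit]
  | cons c r ih =>
      simp only [psplit]
      split
      · simp
      · cases h : psplit r with
        | nil => exact absurd h ih
        | cons a t => simp

theorem splitOn_go_eq (l : List Char) : ∀ (fuel : Nat) (cur : List Char) (acc : List (List Char)),
    l.length < fuel →
    PySem.Chars.splitOn.go ['.'] fuel l cur acc
      = acc.reverse ++ (psplit l).modifyHead (cur.reverse ++ ·) := by
  induction l with
  | nil =>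
      intro fuel cur acc hf
      cases fuel with
      | zero => omega
      | succ f => simp [PySem.Chars.splitOn.go, psplit]
  | cons c r ih =>
      intro fuel cur acc hf
      cases fuel with
      | zero => simp at hf
      | succ f =>
          rw [PySem.Chars.splitOn.go]
          by_cases hc : c = '.'
          · subst hc
            simp only [List.isPrefixOf, beq_self_eq_true, Bool.true_and, if_pos,
              List.length_singleton, List.drop_succ_cons, List.drop_zero]
            rw [ih f [] ((cur.reverse) :: acc) (by simp at hf ⊢; omega)]
            cases h : psplit r with
            | nil => exact absurd h (psplit_ne_nil r)
            | cons a t => simp [psplit, h]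
          · have hpre : List.isPrefixOf ['.'] (c :: r) = false := by
              simp [List.isPrefixOf]; intro h; exact absurd h.symm hc
            rw [hpre]
            simp only [Bool.false_eq_true, if_false]
            rw [ih f (c :: cur) acc (by simp at hf ⊢; omega)]
            simp only [psplit, if_neg hc]
            cases h : psplit r with
            | nil => exact absurd h (psplit_ne_nil r)
            | cons a t => simp

theorem splitOn_eq_psplit (l : List Char) : PySem.Chars.splitOn l ['.'] = psplit l := by
  rw [PySem.Chars.splitOn, splitOn_go_eq l (l.length + 1) [] [] (by omega)]
  cases h : psplit l with
  | nil => exact absurd h (psplit_ne_nil l)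
  | cons a t => simp

theorem psplit_no_dot (l : List Char) : ∀ s ∈ psplit l, '.' ∉ s := by
  induction l with
  | nil => simp [psplit]
  | cons c r ih =>
      simp only [psplit]
      split
      · simpa using ih
      · rename_i hc
        cases h : psplit r with
        | nil => exact absurd h (psplit_ne_nil r)
        | cons a t =>
            intro s hs
            rw [h] at ih
            simp only [List.modifyHead, List.mem_cons] at hs
            rcases hs with rfl | hs
            · intro hmem
              rcases List.mem_cons.mp hmem with h1 | h1
              · exact hc h1.symm
              · exact ih a (by simp) h1
            · exact ih s (by simp [hs])

theorem join_modifyHead (c : Char) (P : List (List Char)) (h : P ≠ []) :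
    PySem.Chars.join ['.'] (P.modifyHead (c :: ·)) = c :: PySem.Chars.join ['.'] P := by
  cases P with
  | nil => exact absurd rfl h
  | cons a t =>
      cases t with
      | nil => simp [PySem.Chars.join, List.intercalate]
      | cons b t' =>
          simp only [List.modifyHead]
          rw [PySem.Chars.join_cons_cons, PySem.Chars.join_cons_cons]
          simp

theorem join_psplit (l : List Char) : PySem.Chars.join ['.'] (psplit l) = l := by
  induction l with
  | nil => simp [psplit, PySem.Chars.join, List.intercalate]
  | cons c r ih =>
      simp only [psplit]
      split
      · rename_i hc
        subst hc
        cases h : psplit r with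
        | nil => exact absurd h (psplit_ne_nil r)
        | cons a t =>
            rw [PySem.Chars.join_cons_cons]
            rw [h] at ih
            simp [ih]
      · rw [join_modifyHead c _ (psplit_ne_nil r), ih]

theorem join_append_join (xs ys : List (List Char)) (hx : xs ≠ []) (hy : ys ≠ []) :
    PySem.Chars.join ['.'] (xs ++ ys)
      = PySem.Chars.join ['.'] xs ++ '.' :: PySem.Chars.join ['.'] ys := by
  induction xs with
  | nil => exact absurd rfl hx
  | cons a xs ih =>
      cases xs with
      | nil =>
          cases ys with
          | nil => exact absurd rfl hy
          | cons b t =>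
              rw [List.singleton_append, PySem.Chars.join_cons_cons]
              simp [PySem.Chars.join, List.intercalate]
      | cons a2 xs2 =>
          have ih' := ih (by simp)
          rw [show (a :: a2 :: xs2) ++ ys = a :: a2 :: (xs2 ++ ys) by simp]
          rw [PySem.Chars.join_cons_cons]
          rw [show a2 :: (xs2 ++ ys) = (a2 :: xs2) ++ ys by simp]
          rw [ih', PySem.Chars.join_cons_cons]
          simp

theorem join_take_prefix_dot (P : List (List Char)) (m : Nat) (h1 : 1 ≤ m) (h2 : m < P.length) :
    PySem.Chars.join ['.'] (P.take m) ++ ['.'] <+: PySem.Chars.join ['.'] P := by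
  have hsplit : PySem.Chars.join ['.'] P
      = PySem.Chars.join ['.'] (P.take m) ++ '.' :: PySem.Chars.join ['.'] (P.drop m) := by
    have hPne : P ≠ [] := by intro h; subst h; simp at h2
    conv_lhs => rw [← List.take_append_drop m P]
    exact join_append_join _ _
      (by rw [Ne, List.take_eq_nil_iff]; push Not; exact ⟨by omega, hPne⟩)
      (by rw [Ne, List.drop_eq_nil_iff]; omega)
  rw [hsplit]
  exact ⟨PySem.Chars.join ['.'] (P.drop m), by simp⟩

theorem join_take_succ (P : List (List Char)) (m : Nat) (h1 : 1 ≤ m) (h2 : m < P.length) :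
    PySem.Chars.join ['.'] (P.take (m + 1))
      = PySem.Chars.join ['.'] (P.take m) ++ '.' :: P[m] := by
  have hPne : P ≠ [] := by intro h; subst h; simp at h2
  rw [List.take_add_one, List.getElem?_eq_getElem h2]
  rw [join_append_join _ _
    (by rw [Ne, List.take_eq_nil_iff]; push Not; exact ⟨by omega, hPne⟩) (by simp)]
  simp [PySem.Chars.join, List.intercalate]

theorem join_take_len_lt (P : List (List Char)) (m1 m2 : Nat) (h1 : 1 ≤ m1) (h12 : m1 < m2)
    (h2 : m2 ≤ P.length) :
    (PySem.Chars.join ['.'] (P.take m1)).length < (PySem.Chars.join ['.'] (P.take m2)).length := by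
  induction m2 with
  | zero => omega
  | succ m ih =>
      by_cases hm : m1 = m
      · subst hm
        rw [join_take_succ P m1 h1 (by omega)]
        simp
      · have := ih (by omega) (by omega)
        rw [join_take_succ P m (by omega) (by omega)]
        simp
        omega

theorem dotted_prefix_is_join (P : List (List Char)) (hnd : ∀ s ∈ P, '.' ∉ s) :
    ∀ k : List Char, (k ++ ['.']) <+: PySem.Chars.join ['.'] P →
    ∃ m, 1 ≤ m ∧ m < P.length ∧ k = PySem.Chars.join ['.'] (P.take m) := by
  induction P with
  | nil =>
      intro k hk
      have := hk.length_le
      simp [PySem.Chars.join, List.intercalate] at this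
  | cons p P ih =>
      intro k hk
      cases P with
      | nil =>
          exfalso
          have hsub : '.' ∈ p := by
            have : PySem.Chars.join ['.'] [p] = p := by
              simp [PySem.Chars.join, List.intercalate]
            rw [this] at hk
            exact hk.subset (by simp)
          exact hnd p (by simp) hsub
      | cons q r =>
          rw [PySem.Chars.join_cons_cons] at hk
          have hj : p ++ ['.'] ++ PySem.Chars.join ['.'] (q :: r)
              = p ++ '.' :: PySem.Chars.join ['.'] (q :: r) := by simp
          rw [hj] at hk
          -- compare k ++ ['.'] with p
          rcases List.prefix_or_prefix_of_prefix hk (⟨'.' :: PySem.Chars.join ['.'] (q :: r), rfl⟩ :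
              p <+: p ++ '.' :: PySem.Chars.join ['.'] (q :: r)) with hkp | hpk
          · exfalso
            exact hnd p (by simp) (hkp.subset (by simp))
          · -- p <+: k ++ ['.']
            have hpk' : p <+: k ∨ p = k ++ ['.'] := by
              rcases (List.prefix_concat_iff.mp hpk) with h | h
              · right; exact h
              · left; exact h
            rcases hpk' with hpk2 | rfl
            · obtain ⟨k1, rfl⟩ := hpk2
              obtain ⟨t, ht⟩ := hk
              rw [List.append_assoc, List.append_assoc] at ht
              have ht2 : k1 ++ (['.'] ++ t) = '.' :: PySem.Chars.join ['.'] (q :: r) :=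
                List.append_cancel_left ht
              cases k1 with
              | nil =>
                  refine ⟨1, le_refl 1, by simp, ?_⟩
                  simp [PySem.Chars.join, List.intercalate]
              | cons c k1' =>
                  have hc : c = '.' := by
                    have := congrArg (fun l => l.head?) ht2
                    simpa using this
                  subst hc
                  have ht3 : k1' ++ ['.'] ++ t = PySem.Chars.join ['.'] (q :: r) := by
                    have := (List.cons.injEq _ _ _ _).mp ht2
                    rw [← this.2]; simp
                  obtain ⟨m', hm1, hm2, hme⟩ := ih (fun s hs => hnd s (by simp [hs])) k1' ⟨t, ht3⟩
                  refine ⟨m' + 1, by omega, by simp at hm2 ⊢; omega, ?_⟩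
                  have htake : (p :: q :: r).take (m' + 1) = p :: (q :: r).take m' := rfl
                  rw [htake]
                  have hne : (q :: r).take m' ≠ [] := by
                    cases m' with
                    | zero => omega
                    | succ mm => simp
                  rw [show (p :: (q :: r).take m') = [p] ++ (q :: r).take m' by simp]
                  rw [join_append_join _ _ (by simp) hne]
                  rw [← hme]
                  simp [PySem.Chars.join, List.intercalate]
            · exfalso
              exact hnd (k ++ ['.']) (by simp) (by simp)


def goodB (name k : String) : Bool := k == name || PySem.Str.startswith name (k ++ ".")

theorem goodB_iff (name k : String) :
    goodB name k = true ↔ (k = name ∨ k.toList ++ ['.'] <+: name.toList) := by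
  simp only [goodB, Bool.or_eq_true, beq_iff_eq, PySem.Str.startswith]
  rw [PySem.Chars.startswith_iff]
  simp [String.toList_append]

theorem goodB_prefix (name k : String) (h : goodB name k = true) : k.toList <+: name.toList := by
  rcases (goodB_iff name k).mp h with rfl | h
  · exact List.prefix_refl _
  · exact List.IsPrefix.trans ⟨['.'], rfl⟩ h

theorem goodB_unique (name k k' : String) (hk : goodB name k = true) (hk' : goodB name k' = true)
    (hlen : k.toList.length = k'.toList.length) : k = k' := by
  have h1 := (List.prefix_iff_eq_take).mp (goodB_prefix name k hk)
  have h2 := (List.prefix_iff_eq_take).mp (goodB_prefix name k' hk')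
  have : k.toList = k'.toList := by rw [h1, h2, hlen]
  exact String.toList_inj.mp this

theorem resolveLoopA_eq (d : PySem.Dict String String) (name : String) (parts : List String)
    (is : List Int) :
    resolveLoopA d name parts is
      = ((is.map (fun i => PySem.Str.join "." (PySem.List.slice parts none (some (-i))))).find?
          (fun c => d.contains c)).bind
          (fun im => (d.get? im).map (fun v => v ++ PySem.Str.slice name (some (PySem.Str.len im)) none)) := by
  induction is with
  | nil => simp [resolveLoopA]
  | cons i rest ih =>
      simp only [resolveLoopA, List.map_cons, List.find?_cons]
      by_cases h : d.contains (PySem.Str.join "." (PySem.List.slice parts none (some (-i)))) = true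
      · rw [h]
        simp [PySem.Str.join]
      · simp only [Bool.not_eq_true] at h
        rw [h]
        simp [ih]

theorem bestLoopB_spec (name : String) : ∀ (K : List String) (best : Option String),
    (bestLoopB name K best = none ↔ best = none ∧ ∀ k ∈ K, goodB name k = false) ∧
    (∀ b, bestLoopB name K best = some b →
      ((b ∈ K ∧ goodB name b = true) ∨ best = some b) ∧
      (∀ k ∈ K, goodB name k = true → k.toList.length ≤ b.toList.length) ∧
      (∀ b0, best = some b0 → b0.toList.length ≤ b.toList.length)) := by
  intro K
  induction K with
  | nil =>
      intro best
      constructor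
      · simp [bestLoopB]
      · intro b hb
        simp [bestLoopB] at hb
        exact ⟨Or.inr (by simp [hb]), by simp, fun b0 h0 => by simp [hb] at h0; simp [h0]⟩
  | cons key rest ih =>
      intro best
      by_cases hg : goodB name key = true
      · cases best with
        | none =>
            have hstep : bestLoopB name (key :: rest) none = bestLoopB name rest (some key) := by
              simp only [bestLoopB]
              rw [if_pos (by simpa [goodB] using hg)]
            rw [hstep]
            obtain ⟨ihn, ihs⟩ := ih (some key)
            constructor
            · constructor
              · intro h
                rw [ihn] at h
                simp at h
              · rintro ⟨-, h2⟩
                exact absurd (h2 key (by simp)) (by simp [hg])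
            · intro b hb
              obtain ⟨hmem, hmax, hacc⟩ := ihs b hb
              refine ⟨?_, ?_, by simp⟩
              · rcases hmem with ⟨h1, h2⟩ | h1
                · exact Or.inl ⟨by simp [h1], h2⟩
                · have h1' : key = b := by simpa using h1
                  exact Or.inl ⟨by simp [h1'], h1' ▸ hg⟩
              · intro k hk hgk
                rcases List.mem_cons.mp hk with rfl | hk'
                · exact hacc k rfl
                · exact hmax k hk' hgk
        | some b0 =>
            by_cases hlt : PySem.Str.len key > PySem.Str.len b0
            · have hstep : bestLoopB name (key :: rest) (some b0) = bestLoopB name rest (some key) := by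
                simp only [bestLoopB]
                rw [if_pos (by simpa [goodB] using hg), if_pos hlt]
              rw [hstep]
              obtain ⟨ihn, ihs⟩ := ih (some key)
              have hlen : b0.toList.length < key.toList.length := by
                simpa [PySem.Str.len] using hlt
              constructor
              · constructor
                · intro h; rw [ihn] at h; simp at h
                · rintro ⟨h, -⟩; simp at h
              · intro b hb
                obtain ⟨hmem, hmax, hacc⟩ := ihs b hb
                refine ⟨?_, ?_, ?_⟩
                · rcases hmem with ⟨h1, h2⟩ | h1
                  · exact Or.inl ⟨by simp [h1], h2⟩
                  · simp only [Option.some.injEq] at h1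
                    exact Or.inl ⟨by simp [h1], h1 ▸ hg⟩
                · intro k hk hgk
                  rcases List.mem_cons.mp hk with rfl | hk'
                  · exact hacc k rfl
                  · exact hmax k hk' hgk
                · intro bb h0
                  simp only [Option.some.injEq] at h0
                  subst h0
                  have := hacc key rfl
                  omega
            · have hstep : bestLoopB name (key :: rest) (some b0) = bestLoopB name rest (some b0) := by
                simp only [bestLoopB]
                rw [if_pos (by simpa [goodB] using hg), if_neg hlt]
              rw [hstep]
              obtain ⟨ihn, ihs⟩ := ih (some b0)
              have hlen : key.toList.length ≤ b0.toList.length := by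
                simp [PySem.Str.len] at hlt
                exact_mod_cast hlt
              constructor
              · constructor
                · intro h; rw [ihn] at h; simp at h
                · rintro ⟨h, -⟩; simp at h
              · intro b hb
                obtain ⟨hmem, hmax, hacc⟩ := ihs b hb
                refine ⟨?_, ?_, hacc⟩
                · rcases hmem with ⟨h1, h2⟩ | h1
                  · exact Or.inl ⟨by simp [h1], h2⟩
                  · exact Or.inr h1
                · intro k hk hgk
                  rcases List.mem_cons.mp hk with rfl | hk'
                  · exact le_trans hlen (hacc b0 rfl)
                  · exact hmax k hk' hgk
      · have hstep : bestLoopB name (key :: rest) best = bestLoopB name rest best := by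
          simp only [bestLoopB]
          rw [if_neg (by simpa [goodB] using hg)]
        rw [hstep]
        obtain ⟨ihn, ihs⟩ := ih best
        constructor
        · rw [ihn]
          constructor
          · rintro ⟨h1, h2⟩
            refine ⟨h1, fun k hk => ?_⟩
            rcases List.mem_cons.mp hk with rfl | hk'
            · simpa using hg
            · exact h2 k hk'
          · rintro ⟨h1, h2⟩
            exact ⟨h1, fun k hk => h2 k (by simp [hk])⟩
        · intro b hb
          obtain ⟨hmem, hmax, hacc⟩ := ihs b hb
          refine ⟨?_, ?_, hacc⟩
          · rcases hmem with ⟨h1, h2⟩ | h1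
            · exact Or.inl ⟨by simp [h1], h2⟩
            · exact Or.inr h1
          · intro k hk hgk
            rcases List.mem_cons.mp hk with rfl | hk'
            · exact absurd hgk (by simpa using hg)
            · exact hmax k hk' hgk

theorem find_eq_best (name : String) (d : PySem.Dict String String) (cs : List String)
    (hdesc : cs.Pairwise (fun a b => b.toList.length < a.toList.length))
    (hgood : ∀ c ∈ cs, goodB name c = true)
    (hcompl : ∀ k ∈ d.keys, goodB name k = true → k ∈ cs) :
    cs.find? (fun c => d.contains c) = bestLoopB name d.keys none := by
  by_cases hex : ∃ k ∈ d.keys, goodB name k = true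
  · obtain ⟨k0, hk0K, hk0g⟩ := hex
    -- B's side returns some b, a maximal good key
    have hBne : bestLoopB name d.keys none ≠ none := by
      intro h
      rw [(bestLoopB_spec name d.keys none).1] at h
      exact absurd (h.2 k0 hk0K) (by simp [hk0g])
    obtain ⟨b, hb⟩ := Option.ne_none_iff_exists'.mp hBne
    obtain ⟨hbmem, hbmax, -⟩ := (bestLoopB_spec name d.keys none).2 b hb
    have hbK : b ∈ d.keys ∧ goodB name b = true := by
      rcases hbmem with h | h
      · exact h
      · simp at h
    -- A's side finds something: b itself is in cs and contains b
    have hbcs : b ∈ cs := hcompl b hbK.1 hbK.2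
    have hfind_ne : cs.find? (fun c => d.contains c) ≠ none := by
      intro h
      rw [List.find?_eq_none] at h
      exact (h b hbcs) ((PySem.Dict.contains_iff_mem_keys d b).mpr hbK.1)
    obtain ⟨c, hc⟩ := Option.ne_none_iff_exists'.mp hfind_ne
    rw [hb, hc]
    obtain ⟨hcP, pre, suf, hsplit, hprenot⟩ := List.find?_eq_some_iff_append.mp hc
    have hcK : c ∈ d.keys := (PySem.Dict.contains_iff_mem_keys d c).mp hcP
    have hccs : c ∈ cs := by rw [hsplit]; simp
    have hcg : goodB name c = true := hgood c hccs
    -- c is maximal too: b appears in cs, not in pre (its test succeeds), so b = c or b ∈ suf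
    have hble : b.toList.length ≤ c.toList.length := by
      rw [hsplit] at hbcs
      rcases List.mem_append.mp hbcs with hpre | hbc
      · exfalso
        have := hprenot b hpre
        simp [(PySem.Dict.contains_iff_mem_keys d b).mpr hbK.1] at this
      · rcases List.mem_cons.mp hbc with rfl | hsuf
        · exact le_refl _
        · rw [hsplit] at hdesc
          have := (List.pairwise_append.mp hdesc).2.1
          exact le_of_lt ((List.pairwise_cons.mp this).1 b hsuf)
    have hcle : c.toList.length ≤ b.toList.length := hbmax c hcK hcg
    rw [goodB_unique name c b hcg hbK.2 (by omega)]
  · push Not at hex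
    have h1 : cs.find? (fun c => d.contains c) = none := by
      rw [List.find?_eq_none]
      intro c hccs hcon
      exact absurd (hgood c hccs)
        (by simp [hex c ((PySem.Dict.contains_iff_mem_keys d c).mp hcon)])
    have h2 : bestLoopB name d.keys none = none := by
      rw [(bestLoopB_spec name d.keys none).1]
      exact ⟨rfl, fun k hk => by simpa using hex k hk⟩
    rw [h1, h2]


theorem dot_toList : (".").toList = ['.'] := rfl

theorem parts_eq (name : String) :
    (PySem.Str.split? name ".").getD [] = List.map String.ofList (psplit name.toList) := by
  simp [PySem.Str.split?, PySem.Chars.split?, dot_toList, splitOn_eq_psplit]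

theorem slice_len_self (name : String) :
    PySem.Str.slice name (some (PySem.Str.len name)) none = "" := by
  apply String.toList_inj.mp
  simp [PySem.Str.slice, PySem.Str.len]

theorem head_value (d : PySem.Dict String String) (name : String) (h : d.contains name = true) :
    (d.get? name).map (fun v => v ++ PySem.Str.slice name (some (PySem.Str.len name)) none)
      = d.get? name := by
  have hs : (d.get? name).isSome := by
    rw [← PySem.Dict.contains_eq_isSome_get?]; exact h
  obtain ⟨v, hv⟩ := Option.isSome_iff_exists.mp hs
  rw [hv, slice_len_self]
  simp

theorem cand_eq (name : String) (j : Nat) :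
    PySem.Str.join "." (PySem.List.slice (List.map String.ofList (psplit name.toList)) none (some (-(1 + (j : Int)))))
      = String.ofList (PySem.Chars.join ['.'] ((psplit name.toList).take ((psplit name.toList).length - 1 - j))) := by
  have h1 : (-(1 + (j : Int))) = -(((j + 1 : Nat) : Int)) := by push_cast; ring
  rw [h1, PySem.List.slice_to_neg_natCast _ (j + 1) (by omega)]
  have h2 : (List.map String.ofList (psplit name.toList)).length - (j + 1)
      = (psplit name.toList).length - 1 - j := by simp; omega
  rw [h2, ← List.map_take]
  apply String.toList_inj.mp
  simp [PySem.Str.join, dot_toList, List.map_map, Function.comp_def]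

theorem resolve_eq_alt (name : String) (scope : List (String × String)) :
    resolve_in_py name scope = resolve_in_py_alt name scope := by
  set d := PySem.Dict.ofList scope with hd
  set n := name.toList with hn
  set P := psplit n with hP
  set L := P.length with hL
  have hL1 : 1 ≤ L := List.length_pos_iff.mpr (psplit_ne_nil n)
  have hjoinP : PySem.Chars.join ['.'] P = n := join_psplit n
  -- the candidate function over Nat indices
  set f : Nat → String := fun j => String.ofList (PySem.Chars.join ['.'] (P.take (L - 1 - j))) with hf
  have hflen : ∀ j, j < L - 1 → (f j).toList.length < n.length := by
    intro j hj
    have := join_take_len_lt P (L - 1 - j) L (by omega) (by omega) (le_refl L)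
    rw [List.take_length, hjoinP] at this
    simpa [hf] using this
  have hfgood : ∀ j, j < L - 1 → goodB name (f j) = true := by
    intro j hj
    rw [goodB_iff]
    right
    have := join_take_prefix_dot P (L - 1 - j) (by omega) (by omega)
    rw [hjoinP] at this
    simpa [hf] using this
  -- the full candidate list
  set cs : List String := name :: (List.range (L - 1)).map f with hcs
  have hdesc : cs.Pairwise (fun a b => b.toList.length < a.toList.length) := by
    rw [hcs]
    refine List.pairwise_cons.mpr ⟨?_, ?_⟩
    · intro c hc
      obtain ⟨j, hj, rfl⟩ := List.mem_map.mp hc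
      exact hflen j (List.mem_range.mp hj)
    · rw [List.pairwise_map]
      refine List.Pairwise.imp_of_mem ?_ (List.pairwise_lt_range)
      intro j1 j2 h1 h2 hlt
      rw [List.mem_range] at h1 h2
      have := join_take_len_lt P (L - 1 - j2) (L - 1 - j1) (by omega) (by omega) (by omega)
      simpa [hf] using this
  have hgood : ∀ c ∈ cs, goodB name c = true := by
    intro c hc
    rcases List.mem_cons.mp hc with rfl | hc'
    · simp [goodB]
    · obtain ⟨j, hj, rfl⟩ := List.mem_map.mp hc'
      exact hfgood j (List.mem_range.mp hj)
  have hcompl : ∀ k ∈ d.keys, goodB name k = true → k ∈ cs := by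
    intro k _ hk
    rcases (goodB_iff name k).mp hk with rfl | hpre
    · simp [hcs]
    · obtain ⟨m, hm1, hm2, hme⟩ := dotted_prefix_is_join P (psplit_no_dot n) k.toList
        (by rw [hjoinP]; exact hpre)
      rw [← hL] at hm2
      have hkeq : k = f (L - 1 - m) := by
        apply String.toList_inj.mp
        rw [hme]
        simp only [hf]
        have : L - 1 - (L - 1 - m) = m := by omega
        simp [this]
      rw [hkeq, hcs]
      refine List.mem_cons_of_mem _ (List.mem_map.mpr ⟨L - 1 - m, List.mem_range.mpr (by omega), rfl⟩)
  have hfind := find_eq_best name d cs hdesc hgood hcompl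
  -- A's side equals find? over cs, bound through the shared value map
  have hA : resolve_in_py name scope
      = (cs.find? (fun c => d.contains c)).bind
          (fun im => (d.get? im).map (fun v => v ++ PySem.Str.slice name (some (PySem.Str.len im)) none)) := by
    rw [resolve_in_py]
    simp only [← hd]
    rw [hcs, List.find?_cons]
    by_cases hcn : d.contains name = true
    · rw [if_pos hcn, hcn]
      simp only [Option.bind_some]
      exact (head_value d name hcn).symm
    · rw [if_neg hcn]
      simp only [Bool.not_eq_true] at hcn
      rw [hcn]
      rw [parts_eq name, resolveLoopA_eq]
      have hrange : PySem.List.pyRange 1 (PySem.List.len (List.map String.ofList P)) 1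
          = (List.range (L - 1)).map (fun j : Nat => 1 + (j : Int)) := by
        rw [PySem.List.pyRange_one]
        congr 1
        simp [PySem.List.len, hL]
      rw [hrange, List.map_map]
      congr 2
      apply List.map_congr_left
      intro j _
      exact cand_eq name j
  have hB : resolve_in_py_alt name scope
      = (bestLoopB name d.keys none).bind
          (fun im => (d.get? im).map (fun v => v ++ PySem.Str.slice name (some (PySem.Str.len im)) none)) := by
    rw [resolve_in_py_alt]
    simp only [← hd]
    cases bestLoopB name d.keys none with
    | none => simp
    | some b => simp
  rw [hA, hB, hfind]

-- ===== VERDICT (by name: the statement is the Claim_ definition above) =====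
theorem resolve_in_py_spec : Claim_equal_resolve_in_py := by
  intro name scope _
  unfold Spec_resolve_in_py
  exact resolve_eq_alt name scope
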